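-- pv_equiv track=rewrite | github.com/asimunit/agents | workflow_platform/apps/core/utils.py | get_workflow_complexity_score
-- ===== SOURCE A (Python) =====
-- from typing import Dict, Any, List, Optional, Union, Tuple
--
-- def get_workflow_complexity_score(workflow_data: Dict) -> int:
--     """Calculate workflow complexity score"""
--     score = 0
--
--     nodes = workflow_data.get('nodes', [])
--     connections = workflow_data.get('connections', [])
--
--     # Base score from node count
--     score += len(nodes) * 2
--
--     # Add score for connections
--     score += len(connections)
--
--     # Add score for complex node types
--     complex_node_types = ['condition', 'loop', 'transform']
--     for node in nodes:
--         if node.get('type') in complex_node_types: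
--             score += 5
--
--     # Add score for nested workflows
--     for node in nodes:
--         if node.get('type') == 'subworkflow':
--             score += 10
--
--     return min(score, 100)  # Cap at 100
-- ===== SOURCE B (Python) =====
-- WEIGHTS = {'condition': 7, 'loop': 7, 'transform': 7, 'subworkflow': 12}
--
-- def get_workflow_complexity_score(workflow_data):
--     """Calculate workflow complexity score"""
--     nodes = workflow_data.get('nodes', [])
--     budget = 100 - len(workflow_data.get('connections', []))
--     for node in nodes:
--         if budget <= 0:
--             return 100  # cap already reached; every remaining weight is non-negative
--         budget -= WEIGHTS.get(node.get('type'), 2)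
--     return 100 - max(budget, 0)
-- ===== Notes on version B (the rewrite author's own statement) =====
-- stated objective: alternative
-- what changed: Instead of accumulating a score in staged passes with per-type branches, B counts DOWN a budget of 100 in a single pass using a per-node weight table (2 plus the type bonus folded into one lookup) and stops early once the budget is exhausted; the result is recovered as 100 - max(budget, 0), so neither min-cap nor branch chain appears.
import Mathlib
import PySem

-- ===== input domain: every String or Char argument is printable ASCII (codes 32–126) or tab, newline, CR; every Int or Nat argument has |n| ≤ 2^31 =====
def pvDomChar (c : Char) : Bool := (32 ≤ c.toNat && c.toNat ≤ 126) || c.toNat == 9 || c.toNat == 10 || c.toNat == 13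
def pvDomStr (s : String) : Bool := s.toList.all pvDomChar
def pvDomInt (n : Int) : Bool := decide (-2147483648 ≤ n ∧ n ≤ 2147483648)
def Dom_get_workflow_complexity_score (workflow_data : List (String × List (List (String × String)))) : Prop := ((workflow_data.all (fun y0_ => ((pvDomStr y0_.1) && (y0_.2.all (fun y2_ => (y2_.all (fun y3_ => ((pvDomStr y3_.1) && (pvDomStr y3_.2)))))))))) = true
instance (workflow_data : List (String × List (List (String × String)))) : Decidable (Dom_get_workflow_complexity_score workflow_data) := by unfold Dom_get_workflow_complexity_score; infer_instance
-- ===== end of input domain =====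

-- B replaces A's staged accumulating passes with per-type branches by a single budget-countdown
-- pass over a per-node weight table, with early exit once the budget of 100 is spent (objective:
-- alternative — a different algorithm of the same cost).

-- ===== PORT A =====
def get_workflow_complexity_score (workflow_data : List (String × List (List (String × String)))) : Int :=
  let score : Int := 0
  let nodes := (PySem.Dict.mk workflow_data).getD "nodes" []
  let connections := (PySem.Dict.mk workflow_data).getD "connections" []
  let score := score + (nodes.length : Int) * 2
  let score := score + (connections.length : Int)
  let complex_node_types : List String := ["condition", "loop", "transform"]
  let score := nodes.foldl (fun s node =>
    if (((PySem.Dict.mk node).get? "type").any (fun t => complex_node_types.contains t)) then s + 5 else s) score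
  let score := nodes.foldl (fun s node =>
    if ((PySem.Dict.mk node).get? "type") == some "subworkflow" then s + 10 else s) score
  min score 100

-- ===== PORT B =====
-- module-level WEIGHTS table of Source B
def pvWEIGHTS : PySem.Dict String Int :=
  PySem.Dict.mk [("condition", 7), ("loop", 7), ("transform", 7), ("subworkflow", 12)]

-- WEIGHTS.get(node.get('type'), 2); node.get('type') may be None, which is not a key, hence default 2
def pvNodeWeight (node : List (String × String)) : Int :=
  match (PySem.Dict.mk node).get? "type" with
  | some t => pvWEIGHTS.getD t 2
  | none => 2

-- Source B's for-loop with its early 'return 100' and the final 'return 100 - max(budget, 0)'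
def pvBudgetLoop : List (List (String × String)) → Int → Int
  | [], budget => 100 - max budget 0
  | node :: rest, budget =>
      if budget ≤ 0 then 100 else pvBudgetLoop rest (budget - pvNodeWeight node)

def get_workflow_complexity_score_alt (workflow_data : List (String × List (List (String × String)))) : Int :=
  let nodes := (PySem.Dict.mk workflow_data).getD "nodes" []
  let budget : Int := 100 - (((PySem.Dict.mk workflow_data).getD "connections" []).length : Int)
  pvBudgetLoop nodes budget

-- ===== PRECONDITION & SPEC =====
def Spec_get_workflow_complexity_score (workflow_data : List (String × List (List (String × String)))) (out : Int) : Prop := out = get_workflow_complexity_score_alt workflow_data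
instance (workflow_data : List (String × List (List (String × String)))) (out : Int) : Decidable (Spec_get_workflow_complexity_score workflow_data out) := by unfold Spec_get_workflow_complexity_score; infer_instance

-- ===== CLAIM (what is proved, stated in full; the proofs are below) =====
def Claim_equal_get_workflow_complexity_score : Prop := ∀ (workflow_data : List (String × List (List (String × String)))), Dom_get_workflow_complexity_score workflow_data → Spec_get_workflow_complexity_score workflow_data (get_workflow_complexity_score workflow_data)

-- ===== LEMMAS AND PROOFS =====

-- total weight of a node list
def pvTotalWeight (nodes : List (List (String × String))) : Int :=
  (nodes.map pvNodeWeight).sum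

-- each node weighs exactly 2 plus A's two conditional bonuses (the four type strings are distinct)
theorem pvNodeWeight_eq (node : List (String × String)) :
    pvNodeWeight node
      = 2 + (if (((PySem.Dict.mk node).get? "type").any
                  (fun t => (["condition", "loop", "transform"] : List String).contains t)) then (5 : Int) else 0)
          + (if ((PySem.Dict.mk node).get? "type") == some "subworkflow" then (10 : Int) else 0) := by
  unfold pvNodeWeight
  rcases h : (PySem.Dict.mk node).get? "type" with _ | t
  · simp
  · by_cases h1 : t = "condition"
    · subst h1; decide
    · by_cases h2 : t = "loop"
      · subst h2; decide
      · by_cases h3 : t = "transform"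
        · subst h3; decide
        · by_cases h4 : t = "subworkflow"
          · subst h4; decide
          · have e1 : ("condition" == t) = false := by simp [Ne.symm h1]
            have e2 : ("loop" == t) = false := by simp [Ne.symm h2]
            have e3 : ("transform" == t) = false := by simp [Ne.symm h3]
            have e4 : ("subworkflow" == t) = false := by simp [Ne.symm h4]
            simp [pvWEIGHTS, PySem.Dict.getD, PySem.Dict.get?, List.find?, e1, e2, e3, e4, h1, h2, h3, h4]

theorem pvNodeWeight_pos (node : List (String × String)) : 0 < pvNodeWeight node := by
  rw [pvNodeWeight_eq]; split_ifs <;> omega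

theorem pvTotalWeight_nonneg (nodes : List (List (String × String))) : 0 ≤ pvTotalWeight nodes := by
  induction nodes with
  | nil => simp [pvTotalWeight]
  | cons n r ih =>
    have := pvNodeWeight_pos n
    simp only [pvTotalWeight, List.map_cons, List.sum_cons] at *
    omega

-- the budget-countdown loop computes min (100 - budget + totalweight) 100
theorem pvBudgetLoop_eq (nodes : List (List (String × String))) (b : Int) :
    pvBudgetLoop nodes b = min ((100 - b) + pvTotalWeight nodes) 100 := by
  induction nodes generalizing b with
  | nil =>
    simp only [pvBudgetLoop, pvTotalWeight, List.map_nil, List.sum_nil]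
    omega
  | cons n r ih =>
    have hw := pvNodeWeight_pos n
    have ht := pvTotalWeight_nonneg r
    simp only [pvBudgetLoop, pvTotalWeight, List.map_cons, List.sum_cons] at *
    by_cases hb : b ≤ 0
    · simp only [if_pos hb]; omega
    · simp only [if_neg hb, ih]; omega

-- A's "score += c on match" loops are c · (number of matching nodes)
theorem foldl_if_add_const {α : Type} (p : α → Bool) (c : Int) (l : List α) (a : Int) :
    l.foldl (fun s x => if p x then s + c else s) a = a + c * (l.countP p : Int) := by
  induction l generalizing a with
  | nil => simp
  | cons x xs ih =>
    simp only [List.foldl_cons, List.countP_cons]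
    by_cases h : p x = true
    · simp [h, ih]; ring
    · simp [h, ih]

-- total weight in terms of A's counts
theorem pvTotalWeight_counts (nodes : List (List (String × String))) :
    pvTotalWeight nodes
      = 2 * (nodes.length : Int)
        + 5 * (nodes.countP (fun node => ((PySem.Dict.mk node).get? "type").any
                  (fun t => (["condition", "loop", "transform"] : List String).contains t)) : Int)
        + 10 * (nodes.countP (fun node => ((PySem.Dict.mk node).get? "type") == some "subworkflow") : Int) := by
  induction nodes with
  | nil => simp [pvTotalWeight]
  | cons n r ih =>
    simp only [pvTotalWeight, List.map_cons, List.sum_cons, List.countP_cons, List.length_cons] at *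
    rw [pvNodeWeight_eq n, ih]
    split_ifs <;> push_cast <;> ring

-- ===== VERDICT (by name: the statement is the Claim_ definition above) =====
theorem get_workflow_complexity_score_spec : Claim_equal_get_workflow_complexity_score := by
  intro wd _
  unfold Spec_get_workflow_complexity_score get_workflow_complexity_score get_workflow_complexity_score_alt
  simp only [foldl_if_add_const, pvBudgetLoop_eq, pvTotalWeight_counts]
  ring_nf
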